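-- pv_equiv track=rewrite | github.com/njbergam/dhlab | flaskr/tools/simple_analytics.py | wordProgressionWeighted
-- ===== SOURCE A (Python) =====
-- def wordProgressionWeighted(text, firstgen, secgen):
--     occurences = []
--     section = list(range(100))
--     ocount = 0
--     i = 0
--     while i < len(text):
--         j = i
--         while i < j + 100 and i < len(text):
--             if text[i] in firstgen:
--                 ocount += 4
--             elif text[i] in secgen:
--                 ocount += 1
--             i += 1
--         occurences.append(ocount)
--         ocount = 0
--     return occurences
-- ===== SOURCE B (Python) =====
-- def wordProgressionWeighted(text, firstgen, secgen):
--     # two-pass decomposition: per-char weight table, then fixed-size chunk sums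
--     weights = [4 if c in firstgen else 1 if c in secgen else 0 for c in text]
--     out = []
--     while weights:
--         out.append(sum(weights[:100]))
--         weights = weights[100:]
--     return out
-- ===== Notes on version B (the rewrite author's own statement) =====
-- stated objective: simpler
-- what changed: Replaces A's fused nested while loops with a running counter and manual indexing by a two-pass decomposition: build a per-character weight table in one comprehension, then emit the sum of each successive 100-element slice.
import Mathlib
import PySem

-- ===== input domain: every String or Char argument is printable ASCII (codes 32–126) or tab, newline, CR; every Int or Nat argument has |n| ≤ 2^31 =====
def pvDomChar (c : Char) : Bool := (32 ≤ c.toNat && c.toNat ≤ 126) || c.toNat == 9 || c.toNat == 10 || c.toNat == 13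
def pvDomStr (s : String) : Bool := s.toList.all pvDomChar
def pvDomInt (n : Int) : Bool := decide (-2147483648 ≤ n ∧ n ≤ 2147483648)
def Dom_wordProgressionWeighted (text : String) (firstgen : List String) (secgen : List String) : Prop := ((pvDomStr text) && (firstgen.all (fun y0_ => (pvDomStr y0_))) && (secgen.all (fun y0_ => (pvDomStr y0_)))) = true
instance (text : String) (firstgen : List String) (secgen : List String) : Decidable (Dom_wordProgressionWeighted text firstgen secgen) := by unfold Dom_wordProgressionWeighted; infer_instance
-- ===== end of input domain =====

-- B replaces A's fused nested while loops (running counter + manual index) by a two-pass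
-- decomposition: a per-character weight table, then sums of successive 100-element slices (objective: simpler).

-- ===== PORT A =====
-- inner while: 'while i < j + 100 and i < len(text)' — fuel counts the remaining steps of the
-- 100-bound; returns the final ocount and the rest of the text after position i.
def pvInnerA (firstgen secgen : List String) : Nat → Int → List Char → Int × List Char
  | 0, ocount, cs => (ocount, cs)
  | _ + 1, ocount, [] => (ocount, [])
  | n + 1, ocount, c :: cs =>
      pvInnerA firstgen secgen n
        (if String.singleton c ∈ firstgen then ocount + 4
         else if String.singleton c ∈ secgen then ocount + 1
         else ocount) cs

theorem pvInnerA_len (firstgen secgen : List String) :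
    ∀ (n : Nat) (oc : Int) (cs : List Char),
      (pvInnerA firstgen secgen n oc cs).2.length ≤ cs.length := by
  intro n
  induction n with
  | zero => intro oc cs; simp [pvInnerA]
  | succ n ih =>
    intro oc cs
    cases cs with
    | nil => simp [pvInnerA]
    | cons c cs => exact le_trans (ih _ cs) (by simp)

-- outer while: one iteration per nonempty remainder, appending ocount and resetting it to 0
def pvOuterA (firstgen secgen : List String) : List Char → List Int
  | [] => []
  | c :: cs =>
      let r := pvInnerA firstgen secgen 100 0 (c :: cs)
      r.1 :: pvOuterA firstgen secgen r.2
termination_by cs => cs.length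
decreasing_by
  simp only [pvInnerA]
  exact Nat.lt_succ_of_le (pvInnerA_len firstgen secgen 99 _ cs)

def wordProgressionWeighted (text : String) (firstgen : List String) (secgen : List String) : List Int :=
  pvOuterA firstgen secgen text.toList

-- ===== PORT B =====
def pvWeightB (firstgen secgen : List String) (c : Char) : Int :=
  if String.singleton c ∈ firstgen then 4
  else if String.singleton c ∈ secgen then 1
  else 0

-- 'while weights: out.append(sum(weights[:100])); weights = weights[100:]'
def pvChunksB : List Int → List Int
  | [] => []
  | w :: ws => ((w :: ws).take 100).sum :: pvChunksB ((w :: ws).drop 100)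
termination_by ws => ws.length
decreasing_by simp

def wordProgressionWeighted_alt (text : String) (firstgen : List String) (secgen : List String) : List Int :=
  pvChunksB (text.toList.map (pvWeightB firstgen secgen))

-- ===== PRECONDITION & SPEC =====
def Spec_wordProgressionWeighted (text : String) (firstgen : List String) (secgen : List String) (out : List Int) : Prop := out = wordProgressionWeighted_alt text firstgen secgen
instance (text : String) (firstgen : List String) (secgen : List String) (out : List Int) : Decidable (Spec_wordProgressionWeighted text firstgen secgen out) := by unfold Spec_wordProgressionWeighted; infer_instance

-- ===== CLAIM (what is proved, stated in full; the proofs are below) =====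
def Claim_equal_wordProgressionWeighted : Prop := ∀ (text : String) (firstgen : List String) (secgen : List String), Dom_wordProgressionWeighted text firstgen secgen → Spec_wordProgressionWeighted text firstgen secgen (wordProgressionWeighted text firstgen secgen)

-- ===== LEMMAS AND PROOFS =====
theorem pvInnerA_eq (firstgen secgen : List String) :
    ∀ (n : Nat) (oc : Int) (cs : List Char),
      pvInnerA firstgen secgen n oc cs
        = (oc + ((cs.take n).map (pvWeightB firstgen secgen)).sum, cs.drop n) := by
  intro n
  induction n with
  | zero => intro oc cs; simp [pvInnerA]
  | succ n ih =>
    intro oc cs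
    cases cs with
    | nil => simp [pvInnerA]
    | cons c cs =>
      rw [pvInnerA, ih]
      simp only [List.take_succ_cons, List.map_cons, List.sum_cons, List.drop_succ_cons]
      unfold pvWeightB
      split_ifs <;> simp <;> ring

theorem pvOuterA_eq (firstgen secgen : List String) :
    ∀ (cs : List Char),
      pvOuterA firstgen secgen cs = pvChunksB (cs.map (pvWeightB firstgen secgen)) := by
  suffices h : ∀ (n : Nat) (cs : List Char), cs.length ≤ n →
      pvOuterA firstgen secgen cs = pvChunksB (cs.map (pvWeightB firstgen secgen)) by
    exact fun cs => h cs.length cs le_rfl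
  intro n
  induction n with
  | zero =>
    intro cs h
    have : cs = [] := List.eq_nil_of_length_eq_zero (Nat.le_zero.mp h)
    subst this
    simp [pvOuterA, pvChunksB]
  | succ n ih =>
    intro cs h
    cases cs with
    | nil => simp [pvOuterA, pvChunksB]
    | cons c cs =>
      rw [pvOuterA, List.map_cons, pvChunksB]
      simp only [pvInnerA_eq, zero_add]
      rw [ih]
      · simp [List.map_take, List.map_drop]
      · simp at h ⊢
        omega

-- ===== VERDICT (by name: the statement is the Claim_ definition above) =====
theorem wordProgressionWeighted_spec : Claim_equal_wordProgressionWeighted := by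
  intro text firstgen secgen _
  unfold Spec_wordProgressionWeighted wordProgressionWeighted wordProgressionWeighted_alt
  exact pvOuterA_eq firstgen secgen text.toList
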